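-- pv_equiv track=rewrite | github.com/felidata/MEFE | THmCP-Perez.py | contar_rachas
-- ===== SOURCE A (Python) =====
-- def contar_rachas(X, Y):
--     Z = sorted(list(X) + list(Y))  #Junto las listas X e Y y ordeno de menor a mayor en Z
--     R = 0  # variable para contar las rachas
--     racha_actual = None #inicializo la racha actual como bandera
--     #cuento las rachas en la lista Z
--     for num in Z:
--         if num in X:
--             if racha_actual != 'X':  # si la racha actual no es de la lista X, sumo una nueva racha
--                 R += 1
--                 racha_actual = 'X'
--         elif num in Y:
--             if racha_actual != 'Y':
--                 R += 1
--                 racha_actual = 'Y'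
--
--     return R
-- ===== SOURCE B (Python) =====
-- def contar_rachas(X, Y):
--     # Runs depend only on distinct values: duplicates of a value are adjacent
--     # after sorting and carry the same label ('X' wins when a value is in both).
--     # So merge the two disjoint sorted distinct streams with two pointers and
--     # count switches of the source stream; no merged sort, no membership tests
--     # inside the loop.
--     A = sorted(set(X))
--     B = sorted(set(Y) - set(X))
--     R = 0
--     i = 0
--     j = 0
--     last = None
--     while i < len(A) or j < len(B):
--         if j >= len(B) or (i < len(A) and A[i] < B[j]):
--             cur = 'X'
--             i += 1
--         else:
--             cur = 'Y'
--             j += 1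
--         if cur != last:
--             R += 1
--             last = cur
--     return R
-- ===== Notes on version B (the rewrite author's own statement) =====
-- stated objective: faster
-- what changed: B never sorts or scans the merged list: it deduplicates each side into disjoint sorted sets (runs depend only on distinct values) and counts source switches during a two-pointer merge of the two streams, replacing A's per-element list-membership flag pass.
import Mathlib
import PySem

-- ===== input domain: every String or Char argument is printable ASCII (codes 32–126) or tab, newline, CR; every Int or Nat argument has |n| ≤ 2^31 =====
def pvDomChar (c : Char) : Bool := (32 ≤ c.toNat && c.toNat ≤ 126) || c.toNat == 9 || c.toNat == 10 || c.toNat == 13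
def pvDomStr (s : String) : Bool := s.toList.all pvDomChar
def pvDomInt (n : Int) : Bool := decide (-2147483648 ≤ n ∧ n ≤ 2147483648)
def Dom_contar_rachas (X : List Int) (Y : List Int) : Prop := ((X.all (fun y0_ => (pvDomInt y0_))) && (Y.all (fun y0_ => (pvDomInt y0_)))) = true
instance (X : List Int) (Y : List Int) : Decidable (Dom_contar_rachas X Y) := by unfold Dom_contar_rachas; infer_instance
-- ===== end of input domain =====

-- B replaces A's sort-the-merged-list-and-flag pass by a two-pointer merge of the two
-- disjoint sorted distinct streams, counting source switches (runs depend only on distinct values).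

-- ===== PORT A =====
def contar_rachas (X : List Int) (Y : List Int) : Int :=
  let Z := PySem.List.sorted (X ++ Y) (fun v => v) false
  (Z.foldl (fun (s : Int × Option String) num =>
      if num ∈ X then
        (if s.2 ≠ some "X" then (s.1 + 1, some "X") else s)
      else if num ∈ Y then
        (if s.2 ≠ some "Y" then (s.1 + 1, some "Y") else s)
      else s) ((0 : Int), (none : Option String))).1

-- ===== PORT B =====
-- the while loop of Source B: two pointers become structural consumption of the two lists
def pvLoopB : List Int → List Int → Int → Option String → Int
  | [], [], R, _ => R
  | a :: as', [], R, last =>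
      -- j >= len(B) (and i < len(A)): take from A, cur = 'X'
      pvLoopB as' [] (if last ≠ some "X" then R + 1 else R) (some "X")
  | [], b :: bs', R, last =>
      pvLoopB [] bs' (if last ≠ some "Y" then R + 1 else R) (some "Y")
  | a :: as', b :: bs', R, last =>
      if a < b then
        pvLoopB as' (b :: bs') (if last ≠ some "X" then R + 1 else R) (some "X")
      else
        pvLoopB (a :: as') bs' (if last ≠ some "Y" then R + 1 else R) (some "Y")
  termination_by as bs _ _ => as.length + bs.length

def contar_rachas_alt (X : List Int) (Y : List Int) : Int :=
  let A1 := PySem.List.sorted (PySem.Set.ofList X) (fun v => v) false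
  let B1 := PySem.List.sorted (PySem.Set.diff (PySem.Set.ofList Y) (PySem.Set.ofList X)) (fun v => v) false
  pvLoopB A1 B1 0 none

-- ===== PRECONDITION & SPEC =====
def Spec_contar_rachas (X : List Int) (Y : List Int) (out : Int) : Prop := out = contar_rachas_alt X Y
instance (X : List Int) (Y : List Int) (out : Int) : Decidable (Spec_contar_rachas X Y out) := by unfold Spec_contar_rachas; infer_instance

-- ===== CLAIM (what is proved, stated in full; the proofs are below) =====
def Claim_equal_contar_rachas : Prop := ∀ (X : List Int) (Y : List Int), Dom_contar_rachas X Y → Spec_contar_rachas X Y (contar_rachas X Y)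

-- ===== LEMMAS AND PROOFS =====

/-- Run count of a label list, given the previous label (none = start). -/
def pvCnt : Option String → List String → Int
  | _, [] => 0
  | l, a :: t => (if l = some a then 0 else 1) + pvCnt (some a) t

/-- A's fold computes R + run count of the label stream. -/
theorem pvFoldA (X Y : List Int) (zs : List Int) (h : ∀ z ∈ zs, z ∈ X ∨ z ∈ Y) :
    ∀ (R : Int) (l : Option String),
    (zs.foldl (fun (s : Int × Option String) num =>
      if num ∈ X then
        (if s.2 ≠ some "X" then (s.1 + 1, some "X") else s)
      else if num ∈ Y then
        (if s.2 ≠ some "Y" then (s.1 + 1, some "Y") else s)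
      else s) (R, l)).1
    = R + pvCnt l (zs.map (fun v => if v ∈ X then "X" else "Y")) := by
  induction zs with
  | nil => intro R l; simp [pvCnt]
  | cons z t ih =>
    intro R l
    have hz := h z (by simp)
    have ht : ∀ z ∈ t, z ∈ X ∨ z ∈ Y := fun w hw => h w (by simp [hw])
    by_cases hx : z ∈ X
    · simp only [List.foldl_cons, List.map_cons, if_pos hx]
      by_cases hl : l = some "X"
      · rw [if_neg (by simp [hl]), ih ht, pvCnt, if_pos hl, hl]; ring
      · rw [if_pos (by simp [hl]), ih ht, pvCnt, if_neg hl]; ring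
    · have hy : z ∈ Y := hz.resolve_left hx
      simp only [List.foldl_cons, List.map_cons, if_neg hx, if_pos hy]
      by_cases hl : l = some "Y"
      · rw [if_neg (by simp [hl]), ih ht, pvCnt, if_pos hl, hl]; ring
      · rw [if_pos (by simp [hl]), ih ht, pvCnt, if_neg hl]; ring

/-- Remove adjacent duplicate values. -/
def pvDD : List Int → List Int
  | [] => []
  | [a] => [a]
  | a :: b :: t => if a = b then pvDD (b :: t) else a :: pvDD (b :: t)

/-- pvCnt ignores adjacent duplicate values under any labelling. -/
theorem pvCnt_dd (f : Int → String) : ∀ (zs : List Int) (l : Option String),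
    pvCnt l (zs.map f) = pvCnt l ((pvDD zs).map f) := by
  intro zs
  induction zs with
  | nil => intro l; simp [pvDD]
  | cons a t ih =>
    cases t with
    | nil => intro l; simp [pvDD]
    | cons b t' =>
      intro l
      by_cases hab : a = b
      · subst hab
        simp only [pvDD, if_true]
        rw [← ih l]
        simp [pvCnt]
      · simp only [pvDD, if_neg hab, List.map_cons, pvCnt]
        rw [← ih (some (f a))]
        simp [pvCnt]

/-- Membership in pvDD. -/
theorem pvDD_mem : ∀ (zs : List Int) (v : Int), v ∈ pvDD zs ↔ v ∈ zs := by
  intro zs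
  induction zs with
  | nil => simp [pvDD]
  | cons a t ih =>
    cases t with
    | nil => simp [pvDD]
    | cons b t' =>
      intro v
      by_cases hab : a = b
      · simp only [pvDD, if_pos hab]
        rw [ih v]
        subst hab
        simp
      · simp only [pvDD, if_neg hab, List.mem_cons]
        rw [ih v]
        simp

/-- pvDD of a (≤)-sorted list is strictly sorted. -/
theorem pvDD_pairwise : ∀ (zs : List Int), zs.Pairwise (· ≤ ·) → (pvDD zs).Pairwise (· < ·) := by
  intro zs
  induction zs with
  | nil => intro _; simp [pvDD]
  | cons a t ih =>
    cases t with
    | nil => intro _; simp [pvDD]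
    | cons b t' =>
      intro h
      have htail : (b :: t').Pairwise (· ≤ ·) := (List.pairwise_cons.mp h).2
      by_cases hab : a = b
      · simp only [pvDD, if_pos hab]
        exact ih htail
      · simp only [pvDD, if_neg hab]
        refine List.pairwise_cons.mpr ⟨?_, ih htail⟩
        intro w hw
        have hwmem : w ∈ b :: t' := (pvDD_mem _ _).mp hw
        have hale : a ≤ b := (List.pairwise_cons.mp h).1 b (by simp)
        have halt : a < b := lt_of_le_of_ne hale hab
        rcases List.mem_cons.mp hwmem with rfl | hwt
        · exact halt
        · exact lt_of_lt_of_le halt ((List.pairwise_cons.mp htail).1 w hwt)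

/-- The merge order underlying pvLoopB. -/
def pvMergeL : List Int → List Int → List Int
  | [], [] => []
  | a :: as', [] => a :: pvMergeL as' []
  | [], b :: bs' => b :: pvMergeL [] bs'
  | a :: as', b :: bs' =>
      if a < b then a :: pvMergeL as' (b :: bs')
      else b :: pvMergeL (a :: as') bs'
  termination_by as bs => as.length + bs.length

theorem pvMergeL_mem : ∀ (as bs : List Int) (v : Int), v ∈ pvMergeL as bs ↔ v ∈ as ∨ v ∈ bs := by
  intro as bs
  induction as, bs using pvMergeL.induct with
  | case1 => simp [pvMergeL]
  | case2 a as' ih => intro v; simp only [pvMergeL, List.mem_cons]; rw [ih]; simp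
  | case3 b bs' ih => intro v; simp only [pvMergeL, List.mem_cons]; rw [ih]; simp
  | case4 a as' b bs' hab ih =>
    intro v; simp only [pvMergeL, if_pos hab, List.mem_cons]; rw [ih]; simp; tauto
  | case5 a as' b bs' hab ih =>
    intro v; simp only [pvMergeL, if_neg hab, List.mem_cons]; rw [ih]; simp; tauto

/-- Merge of strictly sorted disjoint lists is strictly sorted. -/
theorem pvMergeL_pairwise : ∀ (as bs : List Int), as.Pairwise (· < ·) → bs.Pairwise (· < ·) →
    (∀ v ∈ as, v ∉ bs) → (pvMergeL as bs).Pairwise (· < ·) := by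
  intro as bs
  induction as, bs using pvMergeL.induct with
  | case1 => intro _ _ _; simp [pvMergeL]
  | case2 a as' ih =>
    intro ha _ _
    simp only [pvMergeL]
    refine List.pairwise_cons.mpr ⟨?_, ih (List.pairwise_cons.mp ha).2 (by simp) (by simp)⟩
    intro w hw
    exact (List.pairwise_cons.mp ha).1 w (by simpa [pvMergeL_mem] using hw)
  | case3 b bs' ih =>
    intro _ hb _
    simp only [pvMergeL]
    refine List.pairwise_cons.mpr ⟨?_, ih (by simp) (List.pairwise_cons.mp hb).2 (by simp)⟩
    intro w hw
    exact (List.pairwise_cons.mp hb).1 w (by simpa [pvMergeL_mem] using hw)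
  | case4 a as' b bs' hab ih =>
    intro ha hb hd
    simp only [pvMergeL, if_pos hab]
    refine List.pairwise_cons.mpr ⟨?_, ih (List.pairwise_cons.mp ha).2 hb
      (fun v hv => hd v (by simp [hv]))⟩
    intro w hw
    rcases (pvMergeL_mem _ _ w).mp hw with h1 | h2
    · exact (List.pairwise_cons.mp ha).1 w h1
    · rcases List.mem_cons.mp h2 with rfl | h3
      · exact hab
      · exact lt_trans hab ((List.pairwise_cons.mp hb).1 w h3)
  | case5 a as' b bs' hab ih =>
    intro ha hb hd
    have hba : b < a := by
      have hne : a ≠ b := fun h => hd a (by simp) (by simp [h])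
      omega
    simp only [pvMergeL, if_neg hab]
    refine List.pairwise_cons.mpr ⟨?_, ih ha (List.pairwise_cons.mp hb).2
      (fun v hv => fun hc => hd v hv (by simp [hc]))⟩
    intro w hw
    rcases (pvMergeL_mem _ _ w).mp hw with h1 | h2
    · rcases List.mem_cons.mp h1 with rfl | h3
      · exact hba
      · exact lt_trans hba ((List.pairwise_cons.mp ha).1 w h3)
    · exact (List.pairwise_cons.mp hb).1 w h2

/-- pvLoopB counts runs of the labelled merge stream. -/
theorem pvLoopB_cnt (f : Int → String) : ∀ (as bs : List Int),
    (∀ v ∈ as, f v = "X") → (∀ v ∈ bs, f v = "Y") →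
    ∀ (R : Int) (l : Option String),
    pvLoopB as bs R l = R + pvCnt l ((pvMergeL as bs).map f) := by
  intro as bs
  induction as, bs using pvMergeL.induct with
  | case1 => intro _ _ R l; simp [pvLoopB, pvMergeL, pvCnt]
  | case2 a as' ih =>
    intro hA hB R l
    have hfa : f a = "X" := hA a (by simp)
    simp only [pvLoopB, pvMergeL, List.map_cons, pvCnt, hfa]
    rw [ih (fun v hv => hA v (by simp [hv])) hB]
    by_cases hl : l = some "X" <;> simp [hl] <;> ring
  | case3 b bs' ih =>
    intro hA hB R l
    have hfb : f b = "Y" := hB b (by simp)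
    simp only [pvLoopB, pvMergeL, List.map_cons, pvCnt, hfb]
    rw [ih hA (fun v hv => hB v (by simp [hv]))]
    by_cases hl : l = some "Y" <;> simp [hl] <;> ring
  | case4 a as' b bs' hab ih =>
    intro hA hB R l
    have hfa : f a = "X" := hA a (by simp)
    simp only [pvLoopB, pvMergeL, if_pos hab, List.map_cons, pvCnt, hfa]
    rw [ih (fun v hv => hA v (by simp [hv])) hB]
    by_cases hl : l = some "X" <;> simp [hl] <;> ring
  | case5 a as' b bs' hab ih =>
    intro hA hB R l
    have hfb : f b = "Y" := hB b (by simp)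
    simp only [pvLoopB, pvMergeL, if_neg hab, List.map_cons, pvCnt, hfb]
    rw [ih hA (fun v hv => hB v (by simp [hv]))]
    by_cases hl : l = some "Y" <;> simp [hl] <;> ring

/-- Two strictly sorted Int lists with the same members are equal. -/
theorem pvEq_of_pairwise_lt (l1 l2 : List Int)
    (h1 : l1.Pairwise (· < ·)) (h2 : l2.Pairwise (· < ·))
    (hm : ∀ v, v ∈ l1 ↔ v ∈ l2) : l1 = l2 := by
  have n1 : l1.Nodup := h1.imp (fun h => ne_of_lt h)
  have n2 : l2.Nodup := h2.imp (fun h => ne_of_lt h)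
  have hp : l1.Perm l2 := (List.perm_ext_iff_of_nodup n1 n2).mpr hm
  exact List.Perm.eq_of_pairwise (fun a b _ _ h h' => absurd h' (lt_asymm h)) h1 h2 hp

-- ===== VERDICT (by name: the statement is the Claim_ definition above) =====
theorem contar_rachas_spec : Claim_equal_contar_rachas := by
  intro X Y _
  unfold Spec_contar_rachas contar_rachas contar_rachas_alt
  dsimp only
  set Z := PySem.List.sorted (X ++ Y) (fun v => v) false with hZ
  set A1 := PySem.List.sorted (PySem.Set.ofList X) (fun v => v) false with hA1
  set B1 := PySem.List.sorted (PySem.Set.diff (PySem.Set.ofList Y) (PySem.Set.ofList X)) (fun v => v) false with hB1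
  have hmem : ∀ z ∈ Z, z ∈ X ∨ z ∈ Y := by
    intro z hz
    have := (PySem.List.mem_sorted _ _ _ _).mp hz
    simpa [List.mem_append] using this
  rw [pvFoldA X Y _ hmem 0 none]
  -- memberships
  have hA1mem : ∀ v, v ∈ A1 ↔ v ∈ X := by
    intro v; rw [hA1, PySem.List.mem_sorted, PySem.Set.mem_ofList]
  have hB1mem : ∀ v, v ∈ B1 ↔ v ∈ Y ∧ v ∉ X := by
    intro v; rw [hB1, PySem.List.mem_sorted, PySem.Set.mem_diff, PySem.Set.mem_ofList, PySem.Set.mem_ofList]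
  -- strict sortedness
  have hA1p : A1.Pairwise (· < ·) := by
    rw [hA1]; exact PySem.List.sorted_ofList_pairwise_lt X
  have hB1p : B1.Pairwise (· < ·) := by
    have hle : B1.Pairwise (· ≤ ·) := by
      have := PySem.List.sorted_pairwise (κ := Int)
        (PySem.Set.diff (PySem.Set.ofList Y) (PySem.Set.ofList X)) (fun v => v)
      simpa using this
    have hnd : B1.Nodup := by
      have hperm := PySem.List.sorted_perm
        (PySem.Set.diff (PySem.Set.ofList Y) (PySem.Set.ofList X)) (fun v => v) false
      exact hperm.nodup_iff.mpr (PySem.Set.nodup_diff _ _ (PySem.Set.nodup_ofList Y))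
    have := hle.and hnd
    exact this.imp (fun h => lt_of_le_of_ne h.1 h.2)
  -- identify the merge with the de-duplicated sorted merged list
  have hZp : Z.Pairwise (· ≤ ·) := by
    have := PySem.List.sorted_pairwise (X ++ Y) (fun v => v)
    simpa using this
  have hmrg : pvMergeL A1 B1 = pvDD Z := by
    apply pvEq_of_pairwise_lt
    · exact pvMergeL_pairwise A1 B1 hA1p hB1p
        (fun v hv hc => ((hB1mem v).mp hc).2 ((hA1mem v).mp hv))
    · exact pvDD_pairwise Z hZp
    · intro v
      rw [pvMergeL_mem, pvDD_mem, hA1mem, hB1mem, hZ, PySem.List.mem_sorted,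
        List.mem_append]
      tauto
  rw [pvLoopB_cnt (fun v => if v ∈ X then "X" else "Y") A1 B1
      (fun v hv => by simp [(hA1mem v).mp hv])
      (fun v hv => by simp [((hB1mem v).mp hv).2]) 0 none,
    hmrg, ← pvCnt_dd]
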